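-- pv_equiv track=rewrite | github.com/Zhenghua-404/Reddit-Comment-Classifier | main.py | encodeType
-- ===== SOURCE A (Python) =====
-- def encodeType(reddit_train):
--     typeList = list()
--     typeVector = list()
--
--     for i in range(0, len(reddit_train)):
--         subreddit = reddit_train[i]
--         if subreddit not in typeList:
--             typeList.append(subreddit)
--
--     encoded = list()
--     index = 0
--     for element in typeList:
--         my_tuple = (index, element)
--         index = index + 1
--         encoded.append(my_tuple)
--
--
--     for i in range(0, len(reddit_train)):
--         subreddit = reddit_train[i]
--
--         for k in range(0, len(encoded)):
--             if encoded[k][1] == subreddit: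
--                 typeVector.append(encoded[k][0])
--
--     return typeVector, typeList
-- ===== SOURCE B (Python) =====
-- def encodeType(reddit_train):
--     idx = {}
--     typeVector = []
--     for subreddit in reddit_train:
--         if subreddit not in idx:
--             idx[subreddit] = len(idx)
--         typeVector.append(idx[subreddit])
--     return typeVector, list(idx)
-- ===== Notes on version B (the rewrite author's own statement) =====
-- stated objective: faster
-- what changed: One pass with a dict mapping each label to its first-appearance index, replacing A's three passes (dedup scan with list membership, enumeration into tuples, and a nested scan over the tuple list per element).
import Mathlib
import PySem

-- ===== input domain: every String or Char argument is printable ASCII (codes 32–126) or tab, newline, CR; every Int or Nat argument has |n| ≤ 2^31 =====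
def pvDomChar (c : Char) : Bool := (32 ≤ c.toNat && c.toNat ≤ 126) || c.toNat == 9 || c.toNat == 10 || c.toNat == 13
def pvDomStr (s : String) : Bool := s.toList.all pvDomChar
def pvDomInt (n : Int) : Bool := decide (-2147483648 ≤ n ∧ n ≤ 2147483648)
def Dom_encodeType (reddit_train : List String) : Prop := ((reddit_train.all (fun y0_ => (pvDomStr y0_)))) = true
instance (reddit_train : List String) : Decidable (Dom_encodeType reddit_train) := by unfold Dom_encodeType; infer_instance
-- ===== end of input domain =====

-- B replaces A's three passes (list-membership dedup, enumeration into tuples, nested scan per element)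
-- by one pass with a dict from label to first-appearance index (faster: O(n) vs O(n*m)).

-- ===== PORT A =====
def encodeType (reddit_train : List String) : List Int × List String :=
  let typeList := (PySem.List.pyRange 0 (PySem.List.len reddit_train)).foldl
    (fun tl i =>
      let subreddit := PySem.List.pyGetD reddit_train i ""
      if tl.contains subreddit then tl else tl ++ [subreddit]) []
  let encoded := (typeList.foldl
    (fun (st : List (Int × String) × Int) element => (st.1 ++ [(st.2, element)], st.2 + 1))
    ([], 0)).1
  let typeVector := (PySem.List.pyRange 0 (PySem.List.len reddit_train)).foldl
    (fun tv i =>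
      let subreddit := PySem.List.pyGetD reddit_train i ""
      (PySem.List.pyRange 0 (PySem.List.len encoded)).foldl
        (fun tv2 k =>
          let ek := PySem.List.pyGetD encoded k (0, "")
          if ek.2 == subreddit then tv2 ++ [ek.1] else tv2) tv) []
  (typeVector, typeList)

-- ===== PORT B =====
def encodeType_alt (reddit_train : List String) : List Int × List String :=
  let st := reddit_train.foldl
    (fun (st : PySem.Dict String Int × List Int) subreddit =>
      let idx := if st.1.contains subreddit then st.1
                 else st.1.insert subreddit (st.1.size : Int)
      (idx, st.2 ++ [idx.getD subreddit 0]))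
    (PySem.Dict.empty, [])
  (st.2, st.1.keys)

-- ===== PRECONDITION & SPEC =====
def Spec_encodeType (reddit_train : List String) (out : List Int × List String) : Prop := out = encodeType_alt reddit_train
instance (reddit_train : List String) (out : List Int × List String) : Decidable (Spec_encodeType reddit_train out) := by unfold Spec_encodeType; infer_instance

-- ===== CLAIM (what is proved, stated in full; the proofs are below) =====
def Claim_equal_encodeType : Prop := ∀ (reddit_train : List String), Dom_encodeType reddit_train → Spec_encodeType reddit_train (encodeType reddit_train)

-- ===== LEMMAS AND PROOFS =====

-- A's dedup step: append the label if it is not yet in the list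
def fstep (tl : List String) (s : String) : List String :=
  if tl.contains s then tl else tl ++ [s]

lemma fstep_prefix (xs : List String) : ∀ L, L <+: xs.foldl fstep L := by
  induction xs with
  | nil => intro L; exact List.prefix_rfl
  | cons x xs ih =>
    intro L
    refine List.IsPrefix.trans ?_ (ih (fstep L x))
    unfold fstep; split
    · exact List.prefix_rfl
    · exact List.prefix_append _ _

lemma mem_fstep_foldl (xs : List String) : ∀ L s, s ∈ L → s ∈ xs.foldl fstep L := by
  intro L s h
  exact (fstep_prefix xs L).subset h

lemma mem_of_mem_fstep_foldl (xs : List String) : ∀ L s, s ∈ xs → s ∈ xs.foldl fstep L := by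
  induction xs with
  | nil => intro L s h; cases h
  | cons x xs ih =>
    intro L s h
    rcases List.mem_cons.mp h with rfl | h
    · have hx : s ∈ fstep L s := by
        unfold fstep; split
        · next hc => exact List.contains_iff_mem.mp hc
        · simp
      exact mem_fstep_foldl xs (fstep L s) s hx
    · exact ih _ s h

lemma nodup_fstep_foldl (xs : List String) : ∀ L, L.Nodup → (xs.foldl fstep L).Nodup := by
  induction xs with
  | nil => exact fun L h => h
  | cons x xs ih =>
    intro L h
    apply ih
    unfold fstep; split
    · exact h
    · next hc =>
      have hx : x ∉ L := fun hm => hc (List.contains_iff_mem.mpr hm)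
      simp only [List.nodup_append, List.nodup_singleton, true_and]
      refine ⟨h, ?_⟩
      intro a ha b hb
      rcases List.mem_singleton.mp hb with rfl
      intro hax
      exact hx (hax ▸ ha)

lemma idxOf_prefix {L L' : List String} {s : String} (h : L <+: L') (hm : s ∈ L) :
    L'.idxOf s = L.idxOf s := by
  obtain ⟨t, rfl⟩ := h
  exact List.idxOf_append_of_mem hm

-- A's enumeration loop
lemma enc_foldl (l : List String) : ∀ (acc : List (Int × String)) (n : Int),
    l.foldl (fun (st : List (Int × String) × Int) element => (st.1 ++ [(st.2, element)], st.2 + 1)) (acc, n)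
      = (acc ++ PySem.List.enumerate l n, n + l.length) := by
  induction l with
  | nil => intro acc n; simp [PySem.List.enumerate]
  | cons e l ih =>
    intro acc n
    simp only [List.foldl_cons, ih, PySem.List.enumerate_cons, List.length_cons, Prod.mk.injEq]
    refine ⟨by simp, by push_cast; ring⟩

-- A's inner scan over the enumerated list appends exactly the first-occurrence index
lemma inner_foldl : ∀ (l : List String), l.Nodup → ∀ (n : Int) (tv : List Int) (s : String),
    (PySem.List.enumerate l n).foldl
        (fun tv2 (ek : Int × String) => if ek.2 == s then tv2 ++ [ek.1] else tv2) tv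
      = tv ++ (if s ∈ l then [(n + (l.idxOf s : Int))] else []) := by
  intro l
  induction l with
  | nil => intro _ n tv s; simp [PySem.List.enumerate]
  | cons e l ih =>
    intro hl n tv s
    rw [List.nodup_cons] at hl
    obtain ⟨he, hl⟩ := hl
    rw [PySem.List.enumerate_cons]
    simp only [List.foldl_cons]
    by_cases hes : e = s
    · subst hes
      simp only [beq_self_eq_true, if_true]
      rw [ih hl (n + 1) (tv ++ [n]) e]
      rw [if_neg he, if_pos (List.mem_cons_self)]
      simp [List.idxOf_cons_self]
    · have hb : (e == s) = false := beq_false_of_ne hes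
      simp only [hb, Bool.false_eq_true, if_false]
      rw [ih hl (n + 1) tv s]
      by_cases hm : s ∈ l
      · rw [if_pos hm, if_pos (List.mem_cons_of_mem e hm)]
        rw [List.idxOf_cons_ne l hes]
        congr 1
        simp only [List.cons.injEq, and_true]
        push_cast
        ring
      · have hms : s ∉ e :: l := by
          intro h
          rcases List.mem_cons.mp h with h | h
          · exact hes h.symm
          · exact hm h
        rw [if_neg hm, if_neg hms]

-- B's dict after processing the distinct labels L is exactly L paired with indices n, n+1, …
def pairs : List String → Int → List (String × Int)
  | [], _ => []
  | s :: L, n => (s, n) :: pairs L (n + 1)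

lemma pairs_append (s : String) : ∀ (L : List String) (n : Int),
    pairs (L ++ [s]) n = pairs L n ++ [(s, n + L.length)] := by
  intro L
  induction L with
  | nil => intro n; simp [pairs]
  | cons e L ih =>
    intro n
    have h1 : n + 1 + (L.length : Int) = n + ((L.length : Int) + 1) := by ring
    simp only [List.cons_append, pairs, ih (n+1), List.length_cons]
    push_cast
    rw [h1]

lemma keys_pairs : ∀ (L : List String) (n : Int), (PySem.Dict.mk (pairs L n)).keys = L := by
  intro L
  induction L with
  | nil => intro n; simp [pairs, PySem.Dict.keys]
  | cons e L ih =>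
    intro n
    have := ih (n + 1)
    simp only [pairs, PySem.Dict.keys] at *
    simpa using this

lemma contains_pairs (L : List String) (n : Int) (s : String) :
    (PySem.Dict.mk (pairs L n)).contains s = decide (s ∈ L) := by
  rw [PySem.Dict.contains_eq_decide_mem_keys, keys_pairs]

lemma size_pairs : ∀ (L : List String) (n : Int), (PySem.Dict.mk (pairs L n)).size = L.length := by
  intro L
  induction L with
  | nil => intro n; simp [pairs, PySem.Dict.size]
  | cons e L ih =>
    intro n
    have := ih (n + 1)
    simp only [pairs, PySem.Dict.size] at *
    simpa using this

lemma getD_pairs : ∀ (L : List String) (n : Int) (s : String), s ∈ L →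
    (PySem.Dict.mk (pairs L n)).getD s 0 = n + (L.idxOf s : Int) := by
  intro L
  induction L with
  | nil => intro n s h; cases h
  | cons e L ih =>
    intro n s h
    by_cases hes : e = s
    · subst hes
      simp [pairs, PySem.Dict.getD, PySem.Dict.get?]
    · have hb : (e == s) = false := beq_false_of_ne fun h => hes h
      have hm : s ∈ L := by
        rcases List.mem_cons.mp h with h' | h'
        · exact absurd h'.symm hes
        · exact h'
      have := ih (n + 1) s hm
      simp only [pairs, PySem.Dict.getD, PySem.Dict.get?, List.find?, hb] at this ⊢
      rw [this, List.idxOf_cons_ne _ (by exact fun h => hes (by simpa using h))]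
      push_cast; ring

-- B's single pass, tracked against A's evolving dedup list
lemma B_loop (xs : List String) : ∀ (L : List String) (vec : List Int), L.Nodup →
    xs.foldl
      (fun (st : PySem.Dict String Int × List Int) subreddit =>
        let idx := if st.1.contains subreddit then st.1
                   else st.1.insert subreddit (st.1.size : Int)
        (idx, st.2 ++ [idx.getD subreddit 0]))
      (PySem.Dict.mk (pairs L 0), vec)
    = (PySem.Dict.mk (pairs (xs.foldl fstep L) 0),
       vec ++ xs.map (fun s => ((xs.foldl fstep L).idxOf s : Int))) := by
  induction xs with
  | nil => intro L vec _; simp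
  | cons x xs ih =>
    intro L vec hL
    have hL' : (fstep L x).Nodup := by
      have := nodup_fstep_foldl [x] L hL
      simpa using this
    have hxL' : x ∈ fstep L x := by
      unfold fstep; split
      · next hc => exact List.contains_iff_mem.mp hc
      · simp
    have hdict : (if (PySem.Dict.mk (pairs L 0)).contains x then PySem.Dict.mk (pairs L 0)
                  else (PySem.Dict.mk (pairs L 0)).insert x ((PySem.Dict.mk (pairs L 0)).size : Int))
        = PySem.Dict.mk (pairs (fstep L x) 0) := by
      rw [contains_pairs]
      unfold fstep
      by_cases hm : x ∈ L
      · rw [if_pos (by simpa using hm), if_pos (List.contains_iff_mem.mpr hm)]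
      · rw [if_neg (by simpa using hm), if_neg (fun hc => hm (List.contains_iff_mem.mp hc))]
        apply PySem.Dict.ext
        rw [PySem.Dict.items_insert_of_not_contains _ _ (by rw [contains_pairs]; simpa using hm)]
        rw [size_pairs]
        simpa using (pairs_append x L 0).symm
    have hval : (PySem.Dict.mk (pairs (fstep L x) 0)).getD x 0
        = (((x :: xs).foldl fstep L).idxOf x : Int) := by
      rw [getD_pairs _ 0 x hxL']
      have : ((x :: xs).foldl fstep L).idxOf x = (fstep L x).idxOf x := by
        simp only [List.foldl_cons]
        exact idxOf_prefix (fstep_prefix xs (fstep L x)) hxL'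
      rw [this]; ring
    simp only [List.foldl_cons, List.map_cons]
    rw [hdict]
    have hrec := ih (fstep L x) (vec ++ [(PySem.Dict.mk (pairs (fstep L x) 0)).getD x 0]) hL'
    rw [hrec, hval]
    simp [List.append_assoc]

-- ===== VERDICT (by name: the statement is the Claim_ definition above) =====
theorem encodeType_spec : Claim_equal_encodeType := by
  intro xs _
  unfold Spec_encodeType encodeType encodeType_alt
  dsimp only
  -- A side
  rw [PySem.List.foldl_pyRange_zero_pyGetD xs "" (fun tl subreddit => if tl.contains subreddit then tl else tl ++ [subreddit]) []]
  set tl := xs.foldl (fun tl subreddit => if tl.contains subreddit then tl else tl ++ [subreddit]) [] with htl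
  have htl' : tl = xs.foldl fstep [] := by rw [htl]; rfl
  have hnd : tl.Nodup := by rw [htl']; exact nodup_fstep_foldl xs [] List.nodup_nil
  rw [enc_foldl tl [] 0]
  simp only [List.nil_append]
  rw [PySem.List.foldl_pyRange_zero_pyGetD xs ""
    (fun tv subreddit =>
      (PySem.List.pyRange 0 (PySem.List.len (PySem.List.enumerate tl 0))).foldl
        (fun tv2 k =>
          let ek := PySem.List.pyGetD (PySem.List.enumerate tl 0) k (0, "")
          if ek.2 == subreddit then tv2 ++ [ek.1] else tv2) tv) []]
  have hA : xs.foldl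
      (fun tv subreddit =>
        (PySem.List.pyRange 0 (PySem.List.len (PySem.List.enumerate tl 0))).foldl
          (fun tv2 k =>
            let ek := PySem.List.pyGetD (PySem.List.enumerate tl 0) k (0, "")
            if ek.2 == subreddit then tv2 ++ [ek.1] else tv2) tv) []
      = xs.map (fun s => ((tl.idxOf s : Int))) := by
    rw [PySem.List.foldl_congr_mem xs _
      (fun tv s => tv ++ [(tl.idxOf s : Int)]) []
      (by
        intro tv s hs
        rw [PySem.List.foldl_pyRange_zero_pyGetD (PySem.List.enumerate tl 0) (0, "")
          (fun tv2 (ek : Int × String) => if ek.2 == s then tv2 ++ [ek.1] else tv2) tv]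
        rw [inner_foldl tl hnd 0 tv s]
        have hmem : s ∈ tl := by rw [htl']; exact mem_of_mem_fstep_foldl xs [] s hs
        rw [if_pos hmem]
        simp)]
    exact PySem.List.foldl_append_singleton_eq_map _ xs []
  rw [hA]
  -- B side
  have hB := B_loop xs [] [] List.nodup_nil
  have hempty : (PySem.Dict.empty : PySem.Dict String Int) = PySem.Dict.mk (pairs [] 0) := rfl
  rw [hempty, hB]
  simp only [List.nil_append]
  rw [keys_pairs, ← htl']
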